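-- pv_equiv track=rewrite | github.com/josh-lee-MIE2t5/chemial-Equation-Checker | checkBalance.py | find_unbalanced_atoms
-- ===== SOURCE A (Python) =====
-- def find_unbalanced_atoms(reactant_atoms, product_atoms):
--     """
--     (Dict,Dict) -> Set
--
--     Determine if reactant_atoms and product_atoms contain equal key-value
--     pairs. The keys of both dictionaries are strings representing the
--     chemical abbreviation, the value is an integer representing the number
--     of atoms of that element on one side of a chemical equation.
--
--     Return a set containing all the elements that are not balanced between
--     the two dictionaries.
--
--     >>> find_unbalanced_atoms({"H" : 2, "Cl" : 2, "Na" : 2}, {"H" : 2, "Na" : 1, "Cl" : 2})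
--     {'Na'}
--
--     >>> find_unbalanced_atoms({"H" : 2, "Cl" : 2, "Na" : 2}, {"H" : 2, "Na" : 2, "Cl" : 2})
--     set()
--
--     >>> find_unbalanced_atoms({"H" : 2, "Cl" : 2, "Na" : 2}, {"H" : 2, "F" : 2, "Cl" : 2})
--     {'F', 'Na'}
--     """
--
--     # TODO your code here
--     atoms_not_balanced = {}
--     atoms_not_balanced = set(atoms_not_balanced)
--     for atom in reactant_atoms:
--         if atom not in product_atoms or reactant_atoms[atom] != product_atoms[atom]:
--             atoms_not_balanced.add(atom)
--     for atom in product_atoms: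
--         if atom not in reactant_atoms or product_atoms[atom] != reactant_atoms[atom]:
--             atoms_not_balanced.add(atom)
--     return atoms_not_balanced
-- ===== SOURCE B (Python) =====
-- def find_unbalanced_atoms(reactant_atoms, product_atoms):
--     # Symmetric difference of the item-pair sets: a (key, value) pair survives
--     # iff it is not present identically on both sides; its key is unbalanced.
--     mismatched_pairs = set(reactant_atoms.items()) ^ set(product_atoms.items())
--     return {atom for atom, _count in mismatched_pairs}
-- ===== Notes on version B (the rewrite author's own statement) =====
-- stated objective: simpler
-- what changed: Replaced A's two loops with per-key membership tests and lookups by set algebra on item pairs: the symmetric difference of the two items() sets, projected to keys.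
import Mathlib
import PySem

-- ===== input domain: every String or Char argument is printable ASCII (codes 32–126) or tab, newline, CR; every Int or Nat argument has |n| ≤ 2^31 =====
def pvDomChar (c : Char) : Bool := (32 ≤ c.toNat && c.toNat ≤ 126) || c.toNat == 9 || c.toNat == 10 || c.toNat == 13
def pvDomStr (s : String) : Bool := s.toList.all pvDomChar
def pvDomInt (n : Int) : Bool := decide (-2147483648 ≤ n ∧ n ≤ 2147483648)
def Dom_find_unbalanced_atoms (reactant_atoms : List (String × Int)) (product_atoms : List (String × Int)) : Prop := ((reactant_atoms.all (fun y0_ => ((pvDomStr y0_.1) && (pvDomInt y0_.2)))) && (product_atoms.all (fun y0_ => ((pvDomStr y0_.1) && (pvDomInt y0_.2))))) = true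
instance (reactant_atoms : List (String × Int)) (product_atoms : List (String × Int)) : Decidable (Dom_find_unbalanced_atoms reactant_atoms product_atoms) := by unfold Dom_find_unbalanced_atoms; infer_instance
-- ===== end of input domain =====

-- B replaces A's two lookup loops by set algebra on item pairs: the symmetric
-- difference of the two items() sets, projected to keys (objective: simpler).
-- Dicts are association lists (lookup = first match); a Python set is a PySem.Set.

-- dict lookup d.get(k) (first match); shared dict primitive used by both ports
def pvGet (d : List (String × Int)) (k : String) : Option Int :=
  (d.find? (fun kv => kv.1 == k)).map (·.2)

-- ===== PORT A =====
-- 'atom not in product_atoms or reactant_atoms[atom] != product_atoms[atom]':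
-- inside the loop the lhs lookup is always `some`, so the [] indexing is exact as an Option comparison.
def find_unbalanced_atoms (reactant_atoms : List (String × Int)) (product_atoms : List (String × Int)) : List String :=
  let s1 : PySem.Set String :=
    reactant_atoms.foldl (fun s kv =>
      if (pvGet product_atoms kv.1).isNone || pvGet reactant_atoms kv.1 != pvGet product_atoms kv.1
      then PySem.Set.add s kv.1 else s) PySem.Set.empty
  product_atoms.foldl (fun s kv =>
    if (pvGet reactant_atoms kv.1).isNone || pvGet product_atoms kv.1 != pvGet reactant_atoms kv.1
    then PySem.Set.add s kv.1 else s) s1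

-- ===== PORT B =====
-- set(r.items()) ^ set(p.items()) is PySem.Set.symmDiff; the final set comprehension
-- over its pairs is Set.ofList of the projected keys (exact as a set; the list order
-- chosen here is the symmDiff order, legitimate since Python's set order is unspecified).
def find_unbalanced_atoms_alt (reactant_atoms : List (String × Int)) (product_atoms : List (String × Int)) : List String :=
  let mismatched_pairs : PySem.Set (String × Int) :=
    PySem.Set.symmDiff (PySem.Set.ofList reactant_atoms) (PySem.Set.ofList product_atoms)
  PySem.Set.ofList (mismatched_pairs.map (·.1))

-- ===== PRECONDITION & SPEC =====
-- Pre_ requires distinct keys within each association list: a list with duplicate keys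
-- does not represent any Python dict, so every actual input of A satisfies Pre_.
def Pre_find_unbalanced_atoms (reactant_atoms : List (String × Int)) (product_atoms : List (String × Int)) : Prop :=
  (reactant_atoms.map (·.1)).Nodup ∧ (product_atoms.map (·.1)).Nodup
instance (reactant_atoms : List (String × Int)) (product_atoms : List (String × Int)) : Decidable (Pre_find_unbalanced_atoms reactant_atoms product_atoms) := by unfold Pre_find_unbalanced_atoms; infer_instance

def pvWitness_find_unbalanced_atoms : (List (String × Int)) × (List (String × Int)) :=
  ([("H", 2), ("Cl", 2), ("Na", 2)], [("H", 2), ("Na", 1), ("Cl", 2)])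

def Spec_find_unbalanced_atoms (reactant_atoms : List (String × Int)) (product_atoms : List (String × Int)) (out : List String) : Prop := out = find_unbalanced_atoms_alt reactant_atoms product_atoms
instance (reactant_atoms : List (String × Int)) (product_atoms : List (String × Int)) (out : List String) : Decidable (Spec_find_unbalanced_atoms reactant_atoms product_atoms out) := by unfold Spec_find_unbalanced_atoms; infer_instance

-- ===== CLAIM (what is proved, stated in full; the proofs are below) =====
def Claim_equal_find_unbalanced_atoms : Prop := ∀ (reactant_atoms : List (String × Int)) (product_atoms : List (String × Int)), Dom_find_unbalanced_atoms reactant_atoms product_atoms → Pre_find_unbalanced_atoms reactant_atoms product_atoms → Spec_find_unbalanced_atoms reactant_atoms product_atoms (find_unbalanced_atoms reactant_atoms product_atoms)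

-- ===== LEMMAS AND PROOFS =====

-- conditional Set.add over a list = Set.add over the filtered list
theorem pv_foldl_if_add {α : Type} [BEq α] (P : α → Bool) (l : List α) (s : PySem.Set α) :
    l.foldl (fun s k => if P k then PySem.Set.add s k else s) s
      = (l.filter P).foldl PySem.Set.add s := by
  induction l generalizing s with
  | nil => rfl
  | cons x xs ih =>
      simp only [List.foldl_cons, List.filter_cons]
      by_cases h : P x = true
      · simp [h, ih]
      · simp [h, ih]

-- inside the first loop the key comes from reactant_atoms, so its lookup is `some`
-- and A's disjunction collapses to the lookup comparison; symmetrically for the second loop.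
theorem pv_get_isSome_of_mem {k : String} {d : List (String × Int)}
    (h : k ∈ d.map (·.1)) : (pvGet d k).isSome = true := by
  rcases List.mem_map.1 h with ⟨kv, hkv, hk⟩
  have hf : (d.find? (fun kv' => kv'.1 == k)).isSome = true :=
    List.find?_isSome.2 ⟨kv, hkv, by simp [hk]⟩
  simp [pvGet, hf]

theorem pv_condA_eq {k : String} {r p : List (String × Int)} (h : k ∈ r.map (·.1)) :
    ((pvGet p k).isNone || pvGet r k != pvGet p k) = (pvGet r k != pvGet p k) := by
  have hr := pv_get_isSome_of_mem h
  by_cases hn : (pvGet p k).isNone = true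
  · have : pvGet p k = none := Option.isNone_iff_eq_none.1 hn
    rcases Option.isSome_iff_exists.1 hr with ⟨v, hv⟩
    simp [this, hv]
  · simp at hn
    simp [hn]

theorem pv_condB_eq {k : String} {r p : List (String × Int)} (h : k ∈ p.map (·.1)) :
    ((pvGet r k).isNone || pvGet p k != pvGet r k) = (pvGet r k != pvGet p k) := by
  have hp := pv_get_isSome_of_mem h
  by_cases hn : (pvGet r k).isNone = true
  · have : pvGet r k = none := Option.isNone_iff_eq_none.1 hn
    rcases Option.isSome_iff_exists.1 hp with ⟨v, hv⟩
    simp [this, hv]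
  · simp at hn
    simp [hn, bne_comm]

-- congruence: the loop body may be rewritten pointwise on members of the list
theorem pv_foldl_cond_congr {r : List (String × Int)} (c c' : String → Bool)
    (h : ∀ k ∈ r.map (·.1), c k = c' k) (s : PySem.Set String) :
    r.foldl (fun s kv => if c kv.1 then PySem.Set.add s kv.1 else s) s
      = (r.map (·.1)).foldl (fun s k => if c' k then PySem.Set.add s k else s) s := by
  induction r generalizing s with
  | nil => rfl
  | cons x xs ih =>
      simp only [List.foldl_cons, List.map_cons]
      rw [h x.1 (by simp), ih (fun k hk => h k (by simp [hk]))]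

-- with distinct keys, the first-match lookup characterises pair membership
theorem pv_get_eq_some_iff {k : String} {v : Int} {d : List (String × Int)}
    (hd : (d.map (·.1)).Nodup) : pvGet d k = some v ↔ (k, v) ∈ d := by
  induction d with
  | nil => simp [pvGet]
  | cons x xs ih =>
      simp only [List.map_cons, List.nodup_cons] at hd
      by_cases hk : x.1 = k
      · have hnx : k ∉ xs.map (·.1) := hk ▸ hd.1
        constructor
        · intro h
          simp [pvGet, hk] at h
          have hx : x = (k, v) := Prod.ext hk h
          rw [hx]
          exact List.mem_cons_self
        · intro h
          rcases List.mem_cons.1 h with h | h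
          · simp [pvGet, ← h]
          · exact absurd (List.mem_map.2 ⟨(k, v), h, rfl⟩) hnx
      · have : pvGet (x :: xs) k = pvGet xs k := by
          simp [pvGet, hk]
        rw [this, ih hd.2]
        constructor
        · exact fun h => List.mem_cons_of_mem _ h
        · intro h
          rcases List.mem_cons.1 h with h | h
          · exact absurd (congrArg Prod.fst h).symm hk
          · exact h
  
-- on a member kv of r (both key lists distinct), 'kv ∉ p' is exactly the lookup mismatch
theorem pv_not_mem_iff_cond {kv : String × Int} {r p : List (String × Int)}
    (hr : (r.map (·.1)).Nodup) (hp : (p.map (·.1)).Nodup) (hm : kv ∈ r) :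
    (!(PySem.Set.contains p kv)) = (pvGet r kv.1 != pvGet p kv.1) := by
  have hgr : pvGet r kv.1 = some kv.2 := (pv_get_eq_some_iff hr).2 hm
  by_cases h : kv ∈ p
  · have hgp : pvGet p kv.1 = some kv.2 := (pv_get_eq_some_iff hp).2 h
    have hc : PySem.Set.contains p kv = true := (PySem.Set.contains_iff p kv).2 h
    rw [hc, hgr, hgp]
    simp
  · have hc : PySem.Set.contains p kv = false :=
      Bool.eq_false_iff.2 (fun hcc => h ((PySem.Set.contains_iff p kv).1 hcc))
    have hgp : pvGet p kv.1 ≠ some kv.2 := fun hx => h ((pv_get_eq_some_iff hp).1 hx)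
    rw [hc, hgr]
    simp [bne_iff_ne]
    exact fun hx => hgp (Eq.symm hx)

-- projecting keys out of a filter whose condition factors through the key
theorem pv_map_fst_filter (P : String → Bool) (l : List (String × Int)) :
    (l.filter (fun kv => P kv.1)).map (·.1) = (l.map (·.1)).filter P := by
  induction l with
  | nil => rfl
  | cons x xs ih =>
      by_cases h : P x.1 = true
      · simp [h, ih]
      · simp [h, ih]

-- ===== VERDICT (by name: the statement is the Claim_ definition above) =====
theorem find_unbalanced_atoms_spec : Claim_equal_find_unbalanced_atoms := by
  intro r p _ hpre
  obtain ⟨hr, hp⟩ := hpre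
  show find_unbalanced_atoms r p = find_unbalanced_atoms_alt r p
  unfold find_unbalanced_atoms find_unbalanced_atoms_alt
  set P : String → Bool := fun k => pvGet r k != pvGet p k with hP
  -- A's side: two conditional loops = Set.ofList of the filtered concatenated key lists
  rw [pv_foldl_cond_congr (fun k => (pvGet p k).isNone || pvGet r k != pvGet p k) P
        (fun k hk => pv_condA_eq hk),
      pv_foldl_cond_congr (fun k => (pvGet r k).isNone || pvGet p k != pvGet r k) P
        (fun k hk => pv_condB_eq hk),
      pv_foldl_if_add, pv_foldl_if_add,
      ← List.foldl_append, ← List.filter_append]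
  show ((r.map (·.1) ++ p.map (·.1)).filter P).foldl PySem.Set.add PySem.Set.empty
      = PySem.Set.ofList ((PySem.Set.symmDiff (PySem.Set.ofList r) (PySem.Set.ofList p)).map (·.1))
  -- B's side: with distinct keys the item sets are the lists themselves and
  -- each half of the symmetric difference filters by the same key mismatch P
  have hrn : r.Nodup := hr.of_map
  have hpn : p.Nodup := hp.of_map
  rw [show PySem.Set.symmDiff (PySem.Set.ofList r) (PySem.Set.ofList p)
        = PySem.Set.diff (PySem.Set.ofList r) (PySem.Set.ofList p)
          ++ PySem.Set.diff (PySem.Set.ofList p) (PySem.Set.ofList r) from rfl,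
      PySem.Set.ofList_eq_self_of_nodup r hrn, PySem.Set.ofList_eq_self_of_nodup p hpn]
  rw [show PySem.Set.diff r p = r.filter (fun kv => !(PySem.Set.contains p kv)) from rfl,
      show PySem.Set.diff p r = p.filter (fun kv => !(PySem.Set.contains r kv)) from rfl]
  have e1 : r.filter (fun kv => !(PySem.Set.contains p kv)) = r.filter (fun kv => P kv.1) :=
    List.filter_congr (fun kv hm => pv_not_mem_iff_cond hr hp hm)
  have e2 : p.filter (fun kv => !(PySem.Set.contains r kv)) = p.filter (fun kv => P kv.1) :=
    List.filter_congr (fun kv hm => by rw [pv_not_mem_iff_cond hp hr hm, bne_comm])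
  rw [e1, e2, List.map_append, pv_map_fst_filter P r, pv_map_fst_filter P p,
      ← List.filter_append, PySem.Set.ofList_eq_foldl]
  rfl
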